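/- GENERATED by mk_final_copies.py from the proof of the farm's unit `start_decoder.C8b` (farm:start_decoder.C8b.1: Lemmas.lean) as the
   re-elaboration sweep compiled it — do not edit. -/
import Asan.CheckWalk
import Vorbis.Spec.Units.start_decoder_C8b
import Vorbis.Spec.StartDecoderCarry
import Vorbis.Spec.StartDecoderC7

/-!
  The unit `start_decoder.C8b` (0x114a04 … 0x114a42 + the stub 0x114ac9 … 0x114adb; stb_vorbis_fixed.c 3853–3857): the store of
  `c->sorted_codewords`, its NULL test with `error(f, VORBIS_outofmem)`, the second `setup_malloc(f, 4·(SE+1))`.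
  TWO STRETCHES, cut at 0x114a2f = `ret196` (the return of the check of `c->sorted_entries`), so that the allocator's call lemmas of the
  carry layer (`Cur.alloc_call`, `Cur.alloc_fail_any`) see a cut point whose memory is the one before the push of the return address:
      c8b_where        where the `lengths` / `values` arrays are (inside the arena's buffer, off the struct `cb(i)`)
      c8b_in8m_carry   PURE: `In8M` over a change of memory that keeps the struct but for `sorted_codewords`, `lengths`, `values`
      C8bWin, c8b_carry   `Frame` + CUR(i) over the store of the field (stack, the field, `f->error`)
      C8bMid           the assertion at `ret196`
      c8b_walk1        `At8M1` → `C8bMid` | `AtERR`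
      c8b_req          the request `4·SE + 4`
      c8b_malloc_pre, c8b_off_alloc, c8b_fail_same, c8b_build   the allocator call (pattern of farm/worked/start_decoder.C14a)
      c8b_walk2        `C8bMid` → `At8M2`
-/

open X86 X86.User Asan Vorbis Vorbis.Spec Vorbis.Spec.StartDecoder

set_option maxRecDepth 100000
set_option maxHeartbeats 4000000

namespace Vorbis.Spec.start_decoder_C8b

/-- **Where the arrays of the book under construction are**: the `lengths` array (`entries` bytes; dense: the final
`codeword_lengths` block, sparse: the temp block P1) and, for a sparse book, the `values` array (the temp block P3, `4·SE` bytes)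
lie inside the arena's buffer and off the struct `cb(i)`. What every `Mem.EqOn` of their bytes over a footprint of this segment
(stack, a field of the struct, fields of `*f`, shadow bytes) needs. -/
theorem c8b_where {g : Ghost} {i : Nat} {A2 A3 Ai Aw Ab : Arena} {A : Arena × List Obj} {lengths values : Nat} {v : State}
    (h : Core8 g i A2 A3 Ai Aw Ab A lengths values v) :
    (A.1.B ≤ lengths ∧ lengths + (Codebook.entries v.mem (g.cb v.mem i)).toNat ≤ A.1.B + A.1.L ∧
      (lengths + (Codebook.entries v.mem (g.cb v.mem i)).toNat ≤ g.cb v.mem i ∨ g.cb v.mem i + 2120 ≤ lengths)) ∧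
    (Codebook.sparse v.mem (g.cb v.mem i) = 1 →
      A.1.B ≤ values ∧ values + 4 * (Codebook.sorted_entries v.mem (g.cb v.mem i)).toNat ≤ A.1.B + A.1.L ∧
      (values + 4 * (Codebook.sorted_entries v.mem (g.cb v.mem i)).toNat ≤ g.cb v.mem i ∨ g.cb v.mem i + 2120 ≤ values)) := by
  have ha : ArenaOK A.1 A.2 v.mem g.f := h.cur.sd.arena
  have hcbOK := h.cur.ages.cbOK
  have hcbA : A.1.Blk (codebooksBlock v.mem g.f) := hcbOK.F2.mono h.cur.ages.exti
  have hci := hcbOK.cb_in i h.cur.lt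
  have hcin := arena_inside ha hcbA
  constructor
  · rcases h.k2.sparse_01 with hsp | hsp
    · -- dense: `lengths` is the `codeword_lengths` block, allocated since `Ai`
      have hl := h.dense_lengths hsp
      rw [← h.dense_eq hsp] at hl
      have hS : Since Ai A.1 ⟨lengths, (Codebook.entries v.mem (g.cb v.mem i)).toNat⟩ := hl.mono (h.extb.trans h.extb')
      have hd := ha.old_disjoint_since h.cur.ages.exti hcbOK.F2 hS
      have hin := arena_inside ha hS.1
      unfold Ghost.cb at *
      simp only [vblock, voff] at hci hd hin
      omega
    · -- sparse: `lengths` is the temp block P1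
      have t1 := (h.sparse_temps hsp).tblock (p := lengths)
        (List.mem_cons_of_mem _ (List.mem_cons_of_mem _ List.mem_cons_self))
      have hr := ha.tblock_range t1
      have hd := ha.blk_tblock_disjoint hcbA t1
      have hb := ha.bounds
      have r1 := le_r8 (Codebook.entries v.mem (g.cb v.mem i)).toNat
      unfold Ghost.cb at *
      simp only [vblock, voff] at hci hd hcin
      omega
  · intro hsp
    have t3 := (h.sparse_temps hsp).tblock (p := values) List.mem_cons_self
    have hr := ha.tblock_range t3
    have hd := ha.blk_tblock_disjoint hcbA t3
    have hb := ha.bounds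
    have r1 := le_r8 (4 * (Codebook.sorted_entries v.mem (g.cb v.mem i)).toNat)
    unfold Ghost.cb at *
    simp only [vblock, voff] at hci hd hcin
    omega

/-- **`In8M` over a change of memory that keeps the struct `cb(i)` but for the field `sorted_codewords`** (`[c + 830H, c + 838H)`),
the `lengths` array and (sparse book) the `values` array: `In8M` again at the new state, for a ghost arena `A'` that extends `A`
with the same temp blocks (`A' = A`: the store of the field; `A' = A.pushSetup n`: the allocator). `hF`, `hC`: `Frame` and CUR(i)
at the new state (the carry layer). `Core8` and VAL read no other byte of the memory. -/
theorem c8b_in8m_carry {u₀ : State} {g : Ghost} {i : Nat} {A2 A3 Ai Aw Ab : Arena} {A A' : Arena × List Obj}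
    {lengths values : Nat} {pc pc' : Word} {v w : State}
    (h : In8M u₀ g i A2 A3 Ai Aw Ab A lengths values pc v)
    (hF : Frame u₀ g pc' A' w) (hC : Cur g i A2 A3 Ai A' w) (hcb : g.cb w.mem i = g.cb v.mem i)
    (hc64 : g.cb v.mem i + 2120 ≤ 2 ^ 64)
    (b1 : Mem.EqOn (g.cb v.mem i) (g.cb v.mem i + 2096) v.mem w.mem)
    (b2 : Mem.EqOn (g.cb v.mem i + 2104) (g.cb v.mem i + 2120) v.mem w.mem)
    (hext : A.1.Extends A'.1) (htemps : A'.1.temps = A.1.temps) (hB : A'.1.B = A.1.B)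
    (hlenE : Mem.EqOn lengths (lengths + (Codebook.entries v.mem (g.cb v.mem i)).toNat) v.mem w.mem)
    (hlenI : lengths + (Codebook.entries v.mem (g.cb v.mem i)).toNat ≤ 2 ^ 64)
    (hval : Codebook.sparse v.mem (g.cb v.mem i) = 1 →
      Mem.EqOn values (values + 4 * (Codebook.sorted_entries v.mem (g.cb v.mem i)).toNat) v.mem w.mem ∧
      values + 4 * (Codebook.sorted_entries v.mem (g.cb v.mem i)).toNat ≤ 2 ^ 64)
    (rbx : w.reg .rbx = v.reg .rbx) (r12 : w.reg .r12 = v.reg .r12) :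
    In8M u₀ g i A2 A3 Ai Aw Ab A' lengths values pc' w ∧
      Codebook.sorted_entries w.mem (g.cb v.mem i) = Codebook.sorted_entries v.mem (g.cb v.mem i) ∧
      Codebook.sorted_values w.mem (g.cb v.mem i) = Codebook.sorted_values v.mem (g.cb v.mem i) := by
  obtain ⟨c, hc⟩ : ∃ c, g.cb v.mem i = c := ⟨_, rfl⟩
  rw [hc] at hcb hc64 b1 b2 hlenE hlenI hval ⊢
  have hk := h.core
  have e_dim : Codebook.dimensions w.mem c = Codebook.dimensions v.mem c := by
    simp only [vacc, voff]
    exact b1.i32 _ (by omega) (by omega) (by omega)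
  have e_ent : Codebook.entries w.mem c = Codebook.entries v.mem c := by
    simp only [vacc, voff]
    exact b1.i32 _ (by omega) (by omega) (by omega)
  have e_cl : Codebook.codeword_lengths w.mem c = Codebook.codeword_lengths v.mem c := by
    simp only [vacc, voff]
    exact b1.u64 _ (by omega) (by omega) (by omega)
  have e_lt : Codebook.lookup_type w.mem c = Codebook.lookup_type v.mem c := by
    simp only [vacc, voff]
    exact b1.u8 _ (by omega) (by omega) (by omega)
  have e_sp : Codebook.sparse w.mem c = Codebook.sparse v.mem c := by
    simp only [vacc, voff]
    exact b1.u8 _ (by omega) (by omega) (by omega)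
  have e_lv : Codebook.lookup_values w.mem c = Codebook.lookup_values v.mem c := by
    simp only [vacc, voff]
    exact b1.u32 _ (by omega) (by omega) (by omega)
  have e_mu : Codebook.multiplicands w.mem c = Codebook.multiplicands v.mem c := by
    simp only [vacc, voff]
    exact b1.u64 _ (by omega) (by omega) (by omega)
  have e_cw : Codebook.codewords w.mem c = Codebook.codewords v.mem c := by
    simp only [vacc, voff]
    exact b1.u64 _ (by omega) (by omega) (by omega)
  have e_sv : Codebook.sorted_values w.mem c = Codebook.sorted_values v.mem c := by
    simp only [vacc, voff]
    exact b2.u64 _ (by omega) (by omega) (by omega)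
  have e_se : Codebook.sorted_entries w.mem c = Codebook.sorted_entries v.mem c := by
    simp only [vacc, voff]
    exact b2.i32 _ (by omega) (by omega) (by omega)
  have eused : usedCount w.mem lengths (Codebook.entries v.mem c).toNat =
      usedCount v.mem lengths (Codebook.entries v.mem c).toNat := C7.usedCount_same hlenE hlenI
  have elong : longCount w.mem lengths (Codebook.entries v.mem c).toNat =
      longCount v.mem lengths (Codebook.entries v.mem c).toNat := C7.longCount_same hlenE hlenI
  have hk1 := hk.k1
  have hk2 := hk.k2
  have hlenL := hk.lenL
  have hdv := hk.dense_values
  have hdl := hk.dense_lengths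
  have hdc := hk.dense_codewords
  have hde := hk.dense_eq
  have hdt := hk.dense_temps
  have hdn := hk.dense_cnt
  have hsl := hk.sparse_lengths
  have hst := hk.sparse_temps
  have hsn := hk.sparse_cnt
  have hfr := hk.fresh
  have hsval := h.sparse_val
  have hsepos := h.se_pos
  rw [hc] at hk1 hk2 hlenL hdv hdl hdc hde hdt hdn hsl hst hsn hfr hsval hsepos
  refine ⟨?_, e_se, e_sv⟩
  refine
    { frame := hF
      core :=
        { cur := hC
          extw := hk.extw
          extb := hk.extb
          extb' := hk.extb'.trans hext
          k1 := ?_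
          k2 := ?_
          rbx := rbx.trans hk.rbx
          r12 := r12.trans hk.r12
          lenL := ?_
          dense_values := ?_
          dense_lengths := ?_
          dense_codewords := ?_
          dense_eq := ?_
          dense_temps := ?_
          dense_cnt := ?_
          sparse_lengths := ?_
          sparse_temps := ?_
          sparse_cnt := ?_
          fresh := ?_ }
      sparse_val := ?_
      se_pos := ?_ }
  · rw [hcb]
    exact ⟨by rw [e_dim]; exact hk1.dim_pos, by rw [e_dim]; exact hk1.dim_le, by rw [e_ent]; exact hk1.ent_nonneg,
      by rw [e_ent]; exact hk1.ent_lt⟩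
  · rw [hcb]
    exact
      { sparse_01 := by rw [e_sp]; exact hk2.sparse_01
        se_nonneg := by rw [e_se]; exact hk2.se_nonneg
        se_le := by rw [e_se, e_ent]; exact hk2.se_le
        sparse_pos := by rw [e_sp, e_se]; exact hk2.sparse_pos
        sparse_quarter := by rw [e_sp, e_se, e_ent]; exact hk2.sparse_quarter }
  · rw [hcb, e_ent]
    exact hlenL.same hlenE hlenI
  · rw [hcb, e_sp]
    exact hdv
  · rw [hcb, e_sp, e_cl, e_ent]
    exact hdl
  · rw [hcb, e_sp, e_cw, e_ent]
    exact hdc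
  · rw [hcb, e_sp, e_cl]
    exact hde
  · rw [hcb, e_sp, htemps]
    exact hdt
  · rw [hcb, e_sp]
    intro hs
    have := hdn hs
    unfold CNT' at this ⊢
    rw [e_ent, e_se, elong]
    exact this
  · rw [hcb, e_sp, e_cl, e_se]
    exact hsl
  · rw [hcb, e_sp, e_cw, e_se, e_ent]
    intro hs
    have ht := hst hs
    unfold TempsAre at ht ⊢
    rw [htemps, hB]
    exact ht
  · rw [hcb, e_sp]
    intro hs
    have := hsn hs
    unfold CNT at this ⊢
    rw [e_ent, e_se, eused]
    exact this
  · rw [hcb]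
    exact ⟨by rw [e_lt]; exact hfr.lookup_type, by rw [e_lv]; exact hfr.lookup_values,
      by rw [e_mu]; exact hfr.multiplicands⟩
  · rw [hcb, e_sp, e_se, e_ent]
    intro hs
    obtain ⟨hvE, hvI⟩ := hval hs
    exact (hsval hs).same hvE hvI
  · rw [hcb, e_se]
    exact hsepos

/-- A window of the first stretch of segment C8b: the stack below the steady rsp (the pushed return addresses of the check calls and
of `error`, their frames), the pointer field `sorted_codewords` of the struct `cb(i)` at `c`, `f->eof` / `f->error`. -/
def C8bWin (g : Ghost) (c : Nat) (w : Span) : Prop :=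
  (g.R - 408 ≤ w.lo ∧ w.hi ≤ g.R) ∨ (c + 2096 ≤ w.lo ∧ w.hi ≤ c + 2104) ∨ (g.f + 136 ≤ w.lo ∧ w.hi ≤ g.f + 144)

/-- **The invariant side of the store `c->sorted_codewords = p`** (the twin of `c6b_carry` of farm/worked/start_decoder.C6b): from
`Frame` and CUR(i) at `v` and a later state `s` whose memory differs from `v.mem` only in windows `C8bWin` (no shadow byte): `Frame`
at the new program counter, CUR(i), `cb(i)` unmoved, and every range inside the arena's buffer that misses the field reads the same
(the rest of the struct, the `lengths` and `values` arrays). -/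
theorem c8b_carry {u₀ : State} {g : Ghost} {pc pc' : Word} {i : Nat} {A2 A3 Ai : Arena} {A : Arena × List Obj} {v s : State}
    {ws : List Span} (hfr : Frame u₀ g pc A v) (hcur : Cur g i A2 A3 Ai A v)
    (hs : Mem.SameExcept ws v.mem s.mem) (hun : ShadowUntouched v.mem s.mem)
    (hok : ∀ w, w ∈ ws → C8bWin g (g.cb v.mem i) w)
    (hrip : s.rip = pc') (hrsp : s.reg .rsp = v.reg .rsp) (hcode : CodeOK u₀ s.mem) (hinv : abiInv s)
    (hr14 : s.reg .r14 = v.reg .r14) :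
    Frame u₀ g pc' A s ∧ Cur g i A2 A3 Ai A s ∧ g.cb s.mem i = g.cb v.mem i ∧
      ∀ lo hi, A.1.B ≤ lo → hi ≤ A.1.B + A.1.L → (hi ≤ g.cb v.mem i + 2096 ∨ g.cb v.mem i + 2104 ≤ lo) →
        Mem.EqOn lo hi v.mem s.mem := by
  have hpos : Pos g A := Pos.of hfr hcur
  have hm0 : MInv g i A2 A3 Ai A v.mem := MInv.of hfr hcur
  have hcw := hm0.c_where
  have p1 := hpos.r_eq
  have p2 := hpos.ra_lo
  have p3 := hpos.ra_hi
  have p4 := hpos.f_lo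
  have p5 := hpos.f_hi
  have p6 := hpos.f_stack
  have p7 := hpos.objOut
  have p9 := hpos.ar_lo
  have p10 := hpos.ar_hi
  have p11 := hpos.ar_stack
  have hok0 : ∀ w, w ∈ ws → OkWin g Ai A (g.cb v.mem i) w := by
    intro w hw
    have k := hok w hw
    unfold C8bWin at k
    left
    unfold OkWin0
    omega
  have hb : Bits (g.Blk A) g.len s.mem g.f := by
    apply bits_kept hpos hcur.sd.bits hs
    intro w hw
    have k := hok w hw
    unfold C8bWin at k
    omega
  have hfr' := Frame.step hfr hcur hs hun hok0 hb hrip hrsp hcode hinv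
  obtain ⟨hcur', hcb⟩ := Cur.step hfr hcur hs hun hok0 hb hr14
  refine ⟨hfr', hcur', hcb, ?_⟩
  intro lo hi h1 h2 h3
  apply hs.eqOn
  intro w hw
  have k := hok w hw
  unfold C8bWin at k
  omega

/-- **The state of segment C8b after the check of `c->sorted_entries`** (0x114a2f = `ret196`; line 3857): the first table is stored and
non-NULL — `In8M` at this address, `sorted_codewords` the block of `4·(SE+1)` bytes allocated since `Ab`, `sorted_values` still NULL.
The second stretch (`c8b_walk2`: the call of `setup_malloc`) starts here, so that the allocator's call lemmas (`Cur.alloc_call`,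
`Cur.alloc_fail_any`) see a cut point whose memory is the one before the push of the return address. -/
def C8bMid (u₀ : State) (g : Ghost) (i : Nat) (w : State) : Prop :=
  ∃ A lengths values A2 A3 Ai Aw Ab,
    In8M u₀ g i A2 A3 Ai Aw Ab A lengths values L.start_decoder.ret196 w ∧
    Since Ab A.1 ⟨Codebook.sorted_codewords w.mem (g.cb w.mem i),
      4 * ((Codebook.sorted_entries w.mem (g.cb w.mem i)).toNat + 1)⟩ ∧
    Codebook.sorted_values w.mem (g.cb w.mem i) = 0

/-- **Segment C8b, the first stretch** (0x114a04 … 0x114a2f, and the stub 0x114ac9 … 0x114adb): the checked store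
`c->sorted_codewords = rax`; NULL → `error(f, VORBIS_outofmem)` and the epilogue (`AtERR`); else the check of `c->sorted_entries`
(`C8bMid`). -/
theorem c8b_walk1 (Lay : Layout) (hLay : Lay.hi = 0x1000000) (μ : Microarch) (hμ : UserX.MicroOK μ) (u₀ : State)
    (hcode : HasCodeNat Lay u₀ Vorbis.L.start_decoder.entry Vorbis.Code.code_start_decoder.nat Vorbis.L.start_decoder.size)
    (hld4 : Asan.SmallCheck Lay μ Vorbis.WayInv (Vorbis.CodeOK u₀) [.rax, .rcx, .rdx] 4 Vorbis.L.__asan_load4_noabort.entry)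
    (hst8 : Asan.SmallCheck Lay μ Vorbis.WayInv (Vorbis.CodeOK u₀) [.rax, .rcx, .rdx] 8 Vorbis.L.__asan_store8_noabort.entry)
    (h_error : ∀ (others : List Obj) (frames : List (Nat × FrameLayout)), Calls Lay μ Vorbis.WayInv (Vorbis.conv u₀) Vorbis.L.error.entry (Vorbis.Spec.error.spec others frames))
    (g : Ghost) (i : Nat) (v : State) (hat : At8M1 u₀ g i v) :
    ReachVia Lay μ WayInv v (fun w => C8bMid u₀ g i w ∨ AtERR u₀ g w) := by
  obtain ⟨A, lengths, values, A2, A3, Ai, Aw, Ab, h, hsc0, hsv0, hres⟩ := hat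
  have hfr := h.frame
  have hcur := h.core.cur
  have hhand := hcur.hand
  have he := hfr.entry
  v_entry he
  simp only [depth] at he_room he_stack
  have w_rip := hfr.rip
  have w_rsp := hfr.rsp
  have w_eq : Mem.EqOn Vorbis.L.textLo Vorbis.L.textHi u₀.mem v.mem := hfr.code
  have hdf : v.flags .df = false := (show abiInv _ from hfr.inv).1
  have hmx : v.mxcsr &&& 0x1F80 = 0x1F80 := (show abiInv _ from hfr.inv).2
  have hsse := Vorbis.sseOK_of_abiInv hfr.inv
  obtain ⟨hR1, hR2⟩ := hfr.r_eq
  have eR : g.R = (g.e.reg .rsp).toNat - 1480 := rfl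
  have eRA : g.RA = (g.e.reg .rsp).toNat := rfl
  have c_rsp : v.reg .rsp = g.e.reg .rsp - 1480 := by
    rw [w_rsp, eR, ← Vorbis.addr_sub_lit _ 1480 (by show (1480 : Nat) ≤ _; omega), Vorbis.addr_toNat]
  clear w_rsp
  have k_rsp := c_rsp
  have r_f : v.mem.readLE (g.e.reg .rsp - 1456) 8 = g.f := by
    have e : g.e.reg .rsp - 1456 = addr (g.R + 0x18) := by
      have e1 : g.R + 0x18 = (g.e.reg .rsp).toNat - 1456 := by
        show (g.e.reg .rsp).toNat - 1480 + 0x18 = _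
        omega
      rw [e1, ← Vorbis.addr_sub_lit _ 1456 (by show (1456 : Nat) ≤ _; omega), Vorbis.addr_toNat]
    rw [e]
    exact hcur.slot_f
  have hpos : Pos g A := Pos.of hfr hcur
  have hm0 : MInv g i A2 A3 Ai A v.mem := MInv.of hfr hcur
  have hcw := hm0.c_where
  obtain ⟨⟨hl1, hl2, hl3⟩, hvw⟩ := c8b_where h.core
  obtain ⟨c, hc⟩ : ∃ c, g.cb v.mem i = c := ⟨_, rfl⟩
  have c_r14 := hcur.r14
  rw [hc] at c_r14 hcw hl2 hl3 hvw
  have hcT : (addr c).toNat = c := Vorbis.toNat_addr _ (by omega)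
  have hfT : (addr g.f).toNat = g.f := Vorbis.toNat_addr _ (by
    have := hpos.f_hi
    omega)
  have hsub : ∀ o, o ∈ stackObjs g.frames ++ A.2 → o ∈ stackObjs g.frames' ++ A.2 := by
    intro o ho
    unfold Ghost.frames'
    rw [stackObjs_cons]
    rcases List.mem_append.mp ho with hs | ho'
    · exact List.mem_append_left _ (List.mem_append_right _ hs)
    · exact List.mem_append_right _ ho'
  have herr := h_error A.2 g.frames'
  have hText : 1154368 ≤ A.1.B := hhand.arenaText
  have t1 : (g.e.reg .rsp - 1488).toNat = (g.e.reg .rsp).toNat - 1488 := by u_omega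
  have hfn : (UInt64.ofNat g.f).toNat = g.f := hfT
  u_walk hcode [hμ.vendor] until [Vorbis.L.start_decoder.ret196, Vorbis.L.start_decoder.cut4] span [Vorbis.L.textLo, Vorbis.L.textHi] side (v_side)
  case check_114a0e =>
    -- 0x114a0e: store8 c+830H (sorted_codewords)
    have hun : ShadowUntouched v.mem s_114a0e.mem := by v_untouched
    have hsite := C7.cb_site hcur 2096 8 (by omega) (by omega)
    rw [hc] at hsite
    apply Vorbis.Spec.check_site hfr.shadow hun hsite
    u_omega
  case call_inv => v_inv
  case pre_114ad6 =>
    -- 0x114ad6: error(f, VORBIS_outofmem)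
    have hun : ShadowUntouched v.mem s_114ad6.mem := by v_untouched
    have hf' : (s_114ad6.reg .rdi).toNat = g.f := by
      rw [w_rdi]
      exact hfn
    have hrs : (s_114ad6.reg .rsp).toNat + 8 = g.R := by
      rw [w_rsp, t1]
      omega
    refine ⟨⟨?_, hfr.offText⟩, ?_⟩
    · rw [hrs]
      exact hfr.shadow.untouched hun
    · rw [hf']
      exact hhand.obj.mono hsub
  case check_114a2a =>
    -- 0x114a2a: load4 c+840H (sorted_entries)
    have hun : ShadowUntouched v.mem s_114a2a.mem := by v_untouched
    have hsite := C7.cb_site hcur 2112 4 (by omega) (by omega)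
    rw [hc] at hsite
    apply Vorbis.Spec.check_site hfr.shadow hun hsite
    u_omega
  case cont =>
    -- `error(f, VORBIS_outofmem)` returned (after the store of the NULL): the `jmp` to the epilogue
    have hsA : Mem.SameExcept [⟨g.R - 408, g.R⟩, ⟨c + 2096, c + 2104⟩] v.mem s_114ad6.mem := by u_same
    have hunA : ShadowUntouched v.mem s_114ad6.mem := by v_untouched
    rw [w_mem_114ad6] at hsA hunA
    v_after_call w_rsp_114ad6 w_mem_114ad6
    have hf : (s_114ad6.reg .rdi).toNat = g.f := by
      rw [w_rdi_114ad6]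
      exact hfn
    simp only [hf, t1] at w_same
    have hp : s_114ad6r.reg .rax = 0 ∧ ShadowUntouched s_114ad6.mem s_114ad6r.mem ∧
        s_114ad6r.mem.readLE (s_114ad6.reg .rdi + 140) 4 = (s_114ad6.reg .rsi).toNat % 2 ^ 32 := w_post
    have w_rax : s_114ad6r.reg .rax = 0 := hp.1
    have hun3 : ShadowUntouched s_114ad6.mem s_114ad6r.mem := hp.2.1
    rw [w_mem_114ad6] at hun3
    have hsB : Mem.SameExcept [⟨g.R - 408, g.R⟩, ⟨c + 2096, c + 2104⟩, ⟨g.f + 140, g.f + 144⟩] v.mem s_114ad6r.mem := by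
      refine (C7.sameExcept_weaken hsA ?_).trans (w_same.mono ?_)
      · intro w hw
        simp only [List.mem_cons, List.mem_nil_iff, or_false] at hw ⊢
        rcases hw with rfl | rfl
        · exact Or.inl rfl
        · exact Or.inr (Or.inl rfl)
      · intro w hw a h1 h2
        simp only [List.mem_cons, List.mem_nil_iff, or_false] at hw
        rcases hw with rfl | rfl
        · simp only [] at h1 h2
          exact ⟨_, List.mem_cons_self, by simp only []; omega, by simp only []; omega⟩
        · simp only [] at h1 h2
          exact ⟨_, List.mem_cons_of_mem _ (List.mem_cons_of_mem _ List.mem_cons_self), by simp only []; omega,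
            by simp only []; omega⟩
    have hunB : ShadowUntouched v.mem s_114ad6r.mem := Mem.EqOn.trans hunA hun3
    have hokB : ∀ w, w ∈ [(⟨g.R - 408, g.R⟩ : Span), ⟨c + 2096, c + 2104⟩, ⟨g.f + 140, g.f + 144⟩] →
        C8bWin g (g.cb v.mem i) w := by
      intro w hw
      rw [hc]
      simp only [List.mem_cons, List.mem_nil_iff, or_false] at hw
      unfold C8bWin
      rcases hw with rfl | rfl | rfl <;> simp only [] <;> omega
    u_walk hcode [hμ.vendor] until [Vorbis.L.start_decoder.ret196, Vorbis.L.start_decoder.cut4] span [Vorbis.L.textLo, Vorbis.L.textHi] side (v_side)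
    have hsC : Mem.SameExcept [⟨g.R - 408, g.R⟩, ⟨c + 2096, c + 2104⟩, ⟨g.f + 140, g.f + 144⟩] v.mem s_114adb.mem := by
      rw [w_mem]
      exact hsB
    have hunC : ShadowUntouched v.mem s_114adb.mem := by
      rw [w_mem]
      exact hunB
    have hinv' : abiInv s_114adb := by
      refine Vorbis.abiInv_of ?_ ?_
      · rw [w_flags]
        exact w_df
      · rw [w_mxcsr]
        exact w_mx
    have hrsp' : s_114adb.reg .rsp = v.reg .rsp := by
      rw [w_rsp, c_rsp]
    obtain ⟨hfr', hcur', _, _⟩ := c8b_carry hfr hcur hsC hunC hokB w_rip hrsp' w_eq hinv' (w_kept.get .r14 rfl)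
    apply ReachVia.done
    refine Or.inr ⟨A, hfr', hhand, Or.inl ⟨?_, hcur'.failed⟩⟩
    rw [w_rax]
    rfl
  case cont =>
    -- `sorted_codewords ≠ NULL`: the check of `c->sorted_entries` passed
    have hne : ¬ v.reg .rax = 0 := by
      intro h0
      rw [h0] at hbr_114a1d
      exact hbr_114a1d rfl
    have hS : Since Ab A.1 ⟨(v.reg .rax).toNat, 4 * ((Codebook.sorted_entries v.mem c).toNat + 1)⟩ := by
      rcases hres with h0 | hS
      · exact absurd h0 hne
      · rw [hc] at hS
        exact hS
    have hsA : Mem.SameExcept [⟨g.R - 408, g.R⟩, ⟨c + 2096, c + 2104⟩] v.mem s_114a2ar.mem := by u_same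
    have hunA : ShadowUntouched v.mem s_114a2ar.mem := by v_untouched
    have hokA : ∀ w, w ∈ [(⟨g.R - 408, g.R⟩ : Span), ⟨c + 2096, c + 2104⟩] → C8bWin g (g.cb v.mem i) w := by
      intro w hw
      rw [hc]
      simp only [List.mem_cons, List.mem_nil_iff, or_false] at hw
      unfold C8bWin
      rcases hw with rfl | rfl <;> simp only [] <;> omega
    have hrsp' : s_114a2ar.reg .rsp = v.reg .rsp := by
      rw [w_rsp, c_rsp]
    have hinv' : abiInv s_114a2ar := by
      refine Vorbis.abiInv_of w_df_114a2a ?_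
      rw [w_mxcsr]
      exact hmx
    obtain ⟨hfr', hcur', hcb, hE⟩ := c8b_carry hfr hcur hsA hunA hokA w_rip hrsp' w_eq hinv' (w_kept.get .r14 rfl)
    rw [hc] at hcb hE
    have e_sc : Codebook.sorted_codewords s_114a2ar.mem c = (v.reg .rax).toNat := by
      simp only [vacc, voff]
      unfold Mem.u64
      rw [← Vorbis.addr_add_lit, w_mem]
      u_read
    have p10 := hpos.ar_hi
    obtain ⟨hin8, e_se, e_sv⟩ := c8b_in8m_carry (pc' := Vorbis.L.start_decoder.ret196) h hfr' hcur' (by rw [hc]; exact hcb)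
      (by rw [hc]; omega)
      (by rw [hc]; exact hE _ _ (by omega) (by omega) (by omega))
      (by rw [hc]; exact hE _ _ (by omega) (by omega) (by omega))
      (Arena.Extends.refl _) rfl rfl
      (by rw [hc]; exact hE _ _ (by omega) (by omega) (by omega))
      (by rw [hc]; omega)
      (by
        rw [hc]
        intro hs
        obtain ⟨hv1, hv2, hv3⟩ := hvw hs
        exact ⟨hE _ _ (by omega) (by omega) (by omega), by omega⟩)
      (w_kept.get .rbx rfl) (w_kept.get .r12 rfl)
    rw [hc] at e_se e_sv
    apply ReachVia.done
    refine Or.inl ⟨A, lengths, values, A2, A3, Ai, Aw, Ab, hin8, ?_, ?_⟩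
    · rw [hcb, e_sc, e_se]
      exact hS
    · rw [hcb, e_sv]
      rw [hc] at hsv0
      exact hsv0

/-- **The request `lea esi, [rax*4 + 4]`** for a count `n < 2^24` zero-extended in eax: `4·(n + 1)`, no 32-bit wrap. -/
theorem c8b_req (n : Nat) (hn : n < 16777216) :
    (Word.ofBV (BitVec.setWidth 32 (Word.ofBV (BitVec.ofNat 32 n) * 4 + 4).toBitVec)).toNat % 2 ^ 32 = 4 * (n + 1) := by
  have e4 : (4 : Word).toNat = 4 := rfl
  rw [Vorbis.toNat_ofBV32, BitVec.toNat_setWidth, UInt64.toNat_toBitVec, UInt64.toNat_add, UInt64.toNat_mul,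
    Vorbis.toNat_ofBV32, BitVec.toNat_ofNat, e4]
  omega


/-- **`setup_malloc`'s precondition at 0x114a42**: the state `s` at the callee's entry has the memory of the cut point but for the
pushed return address below `R` (`hmem`), `rsp = R − 8`, `rdi = f`. -/
theorem c8b_malloc_pre {u₀ : State} {g : Ghost} {i : Nat} {A2 A3 Ai : Arena} {A : Arena × List Obj} {pc : Word} {v s : State}
    (hfr : Frame u₀ g pc A v) (hcur : Cur g i A2 A3 Ai A v) (hun : ShadowUntouched v.mem s.mem)
    (hmem : Mem.EqOn (g.f + 112) (g.f + 136) v.mem s.mem) (hrsp : (s.reg .rsp).toNat + 8 = g.R)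
    (hrdi : (s.reg .rdi).toNat = g.f) : (setup_malloc.spec A.2 g.frames' A.1).pre s := by
  have hob := hcur.sd.bits.OB1
  have hpos := Pos.of hfr hcur
  have hf2 := hpos.f_hi
  refine ⟨⟨?_, hfr.offText⟩, ?_, ?_, hcur.hand.arenaText⟩
  · rw [hrsp]
    exact hfr.shadow.untouched hun
  · rw [hrdi]
    exact hcur.sd.env.live _ hob
  · rw [hrdi]
    apply hcur.sd.arena.frame (by simp only [voff]; omega)
    simp only [voff]
    exact hmem

/-- **A range inside the arena's buffer reads the same over an allocator call** (every window of the footprint is an `AllocWin`: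
the stack below the steady rsp, `[f + 8, f + 12)`, `[f + 128, f + 136)`, shadow bytes): the struct `cb(i)`, the setup blocks AND the
temp blocks (`lengths`, `values` of a sparse book, which `AllKept A.1.Blk` does not cover). -/
theorem c8b_off_alloc {g : Ghost} {A : Arena × List Obj} {m m' : Mem} {ws : List Span} (hp : Pos g A)
    (hs : Mem.SameExcept ws m m') (hok : ∀ w, w ∈ ws → AllocWin g A w) (lo hi : Nat) (h1 : A.1.B ≤ lo)
    (h2 : hi ≤ A.1.B + A.1.L) : Mem.EqOn lo hi m m' := by
  obtain ⟨p1, p2, p3, p4, p5, p6, p7, p8, p9, p10, p11, p12, p13, p14⟩ := hp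
  apply hs.eqOn
  intro w hw
  have k := hok w hw
  unfold AllocWin at k
  omega

/-- **The footprint of a FAILED `call setup_malloc` over the cut point's memory** (the push of the return address, then the failure
clause of the callee's post: its stack window and `setup_memory_required`), every window an `AllocWin`. The part of
`Cur.alloc_fail_any` that the contents of the temp blocks need. -/
theorem c8b_fail_same {g : Ghost} {A : Arena × List Obj} {m ms mr : Mem} {a : Word} {x sp f' : Nat} (hp : Pos g A)
    (hmem : ms = m.writeLE a 8 x) (ha : a.toNat + 8 = g.R) (hsp : sp + 8 = g.R) (hf : f' = g.f)
    (hs : Mem.SameExcept [⟨sp - 80, sp⟩, ⟨f' + 8, f' + 12⟩] ms mr) :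
    ∃ ws, Mem.SameExcept ws m mr ∧ ∀ w, w ∈ ws → AllocWin g A w := by
  have p1 := hp.r_eq
  have p2 := hp.ra_hi
  have p3 := hp.ra_lo
  refine ⟨[⟨g.R - 88, g.R⟩, ⟨g.f + 8, g.f + 12⟩], ?_, ?_⟩
  · refine Mem.SameExcept.trans (ν := ms) ?_ ?_
    · rw [hmem]
      apply Mem.SameExcept.writeLE
      · omega
      · refine ⟨_, List.mem_cons_self, ?_, ?_⟩
        · simp only []
          omega
        · simp only []
          omega
    · apply hs.mono
      intro w hw b h1 h2
      simp only [List.mem_cons, List.mem_nil_iff, or_false] at hw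
      rcases hw with rfl | rfl
      · simp only [] at h1 h2
        exact ⟨_, List.mem_cons_self, by simp only []; omega, by simp only []; omega⟩
      · simp only [] at h1 h2
        exact ⟨_, List.mem_cons_of_mem _ List.mem_cons_self, by simp only []; omega, by simp only []; omega⟩
  · intro w hw
    simp only [List.mem_cons, List.mem_nil_iff, or_false] at hw
    unfold AllocWin
    rcases hw with rfl | rfl
    · left
      simp only []
      omega
    · right
      left
      simp only []
      omega

/-- **`At8M2` from the return of the second allocator, pure part** (both arms): `Frame` and CUR(i) at the returned state `w` for the
ghost `A'` (the grown one, or `A` itself), `cb(i)` unmoved, ONE footprint of allocator windows from the cut point's memory, and the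
allocator's result. `Ac := A.1`, the arena between the two calls. -/
theorem c8b_build {u₀ : State} {g : Ghost} {i : Nat} {A2 A3 Ai Aw Ab : Arena} {A A' : Arena × List Obj} {lengths values : Nat}
    {v w : State} {ws : List Span}
    (h : In8M u₀ g i A2 A3 Ai Aw Ab A lengths values L.start_decoder.ret196 v)
    (hsc : Since Ab A.1 ⟨Codebook.sorted_codewords v.mem (g.cb v.mem i),
      4 * ((Codebook.sorted_entries v.mem (g.cb v.mem i)).toNat + 1)⟩)
    (hsv0 : Codebook.sorted_values v.mem (g.cb v.mem i) = 0)
    (hF : Frame u₀ g L.start_decoder.cut139 A' w) (hC : Cur g i A2 A3 Ai A' w)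
    (hcb : g.cb w.mem i = g.cb v.mem i) (hall : Mem.SameExcept ws v.mem w.mem) (hok : ∀ x, x ∈ ws → AllocWin g A x)
    (hext : A.1.Extends A'.1) (htemps : A'.1.temps = A.1.temps) (hB : A'.1.B = A.1.B)
    (rbx : w.reg .rbx = v.reg .rbx) (r12 : w.reg .r12 = v.reg .r12)
    (halloc : w.reg .rax = 0 ∨
      Since A.1 A'.1 ⟨(w.reg .rax).toNat, 4 * ((Codebook.sorted_entries v.mem (g.cb v.mem i)).toNat + 1)⟩) :
    At8M2 u₀ g i w := by
  have hpos : Pos g A := Pos.of h.frame h.core.cur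
  have hm0 : MInv g i A2 A3 Ai A v.mem := MInv.of h.frame h.core.cur
  have hcw := hm0.c_where
  obtain ⟨⟨hl1, hl2, hl3⟩, hvw⟩ := c8b_where h.core
  have p10 := hpos.ar_hi
  obtain ⟨hin8, e_se, e_sv⟩ := c8b_in8m_carry (pc' := L.start_decoder.cut139) h hF hC hcb (by omega)
    (c8b_off_alloc hpos hall hok _ _ (by omega) (by omega))
    (c8b_off_alloc hpos hall hok _ _ (by omega) (by omega))
    hext htemps hB
    (c8b_off_alloc hpos hall hok _ _ (by omega) (by omega))
    (by omega)
    (by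
      intro hs
      obtain ⟨hv1, hv2, hv3⟩ := hvw hs
      exact ⟨c8b_off_alloc hpos hall hok _ _ (by omega) (by omega), by omega⟩)
    rbx r12
  have e_sc : Codebook.sorted_codewords w.mem (g.cb v.mem i) = Codebook.sorted_codewords v.mem (g.cb v.mem i) := by
    have b3 : Mem.EqOn (g.cb v.mem i + 2096) (g.cb v.mem i + 2104) v.mem w.mem :=
      c8b_off_alloc hpos hall hok _ _ (by omega) (by omega)
    simp only [vacc, voff]
    exact b3.u64 _ (by omega) (by omega) (by omega)
  refine ⟨A', lengths, values, A2, A3, Ai, Aw, Ab, A.1, hin8, h.core.extb', hext, ?_, ?_, ?_⟩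
  · rw [hcb, e_sc, e_se]
    exact hsc
  · rw [hcb, e_sv]
    exact hsv0
  · rw [hcb, e_se]
    exact halloc

/-- **Segment C8b, the second stretch** (0x114a2f … 0x114a42, line 3857): `esi = 4·SE + 4`, `rdi = f`,
`call setup_malloc`, both arms (`Cur.alloc_call` / `Cur.alloc_fail_any`): `At8M2` at the return 0x114a47 = `cut139`. -/
theorem c8b_walk2 (Lay : Layout) (hLay : Lay.hi = 0x1000000) (μ : Microarch) (hμ : UserX.MicroOK μ) (u₀ : State)
    (hcode : HasCodeNat Lay u₀ Vorbis.L.start_decoder.entry Vorbis.Code.code_start_decoder.nat Vorbis.L.start_decoder.size)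
    (hmalloc : ∀ (others : List Obj) (frames : List (Nat × FrameLayout)) (A : Arena), Calls Lay μ Vorbis.WayInv (Vorbis.conv u₀) Vorbis.L.setup_malloc.entry (Vorbis.Spec.setup_malloc.spec others frames A))
    (g : Ghost) (i : Nat) (v : State) (hat : C8bMid u₀ g i v) :
    ReachVia Lay μ WayInv v (fun w => At8M2 u₀ g i w) := by
  obtain ⟨A, lengths, values, A2, A3, Ai, Aw, Ab, h, hsc, hsv0⟩ := hat
  have hfr0 := h.frame
  have hcur := h.core.cur
  have he := hfr0.entry
  v_entry he
  have w_rip := hfr0.rip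
  have hshad := hfr0.shadow
  have hpos : Pos g A := Pos.of hfr0 hcur
  have p1 := hpos.r_eq
  have p2 := hpos.ra_lo
  have p3 := hpos.ra_hi
  have p4 := hpos.f_lo
  have p5 := hpos.f_hi
  have p6 := hpos.f_stack
  have p9 := hpos.ar_lo
  have p10 := hpos.ar_hi
  have hsp : (v.reg .rsp).toNat = g.R := by
    rw [hfr0.rsp]
    exact toNat_addr _ (by omega)
  have hm0 : MInv g i A2 A3 Ai A v.mem := MInv.of hfr0 hcur
  have hcw := hm0.c_where
  obtain ⟨c, hc⟩ : ∃ c, g.cb v.mem i = c := ⟨_, rfl⟩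
  have c_r14 := hcur.r14
  rw [hc] at c_r14 hcw
  have hcT : (addr c).toNat = c := Vorbis.toNat_addr _ (by omega)
  have hk1 := h.core.k1
  have hk2 := h.core.k2
  rw [hc] at hk1 hk2
  have w_eq : Mem.EqOn Vorbis.L.textLo Vorbis.L.textHi u₀.mem v.mem := hfr0.code
  have hdf : v.flags .df = false := (show abiInv _ from hfr0.inv).1
  have hmx : v.mxcsr &&& 0x1F80 = 0x1F80 := (show abiInv _ from hfr0.inv).2
  have hsse := Vorbis.sseOK_of_abiInv hfr0.inv
  have hRA : g.RA = (g.e.reg .rsp).toNat := rfl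
  have hslotf : v.mem.readLE (v.reg .rsp + 24) 8 = g.f := by
    have := hcur.slot_f
    rw [hfr0.rsp]
    simp only [vfield]
    exact this
  -- the request: `c->sorted_entries`, a count below 2^24
  have hse0 : 0 ≤ Codebook.sorted_entries v.mem c := hk2.se_nonneg
  have hse24 : (Codebook.sorted_entries v.mem c).toNat < 16777216 := by
    have := hk2.se_le
    have := hk1.ent_lt
    omega
  have r_se : v.mem.readLE (addr c + 2112) 4 = (Codebook.sorted_entries v.mem c).toNat := by
    have e := v.mem.u32_of_i32_nonneg (c + 2112) (by
      simp only [vacc, voff] at hse0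
      exact hse0)
    simp only [vacc, voff]
    rw [← e]
    unfold Mem.u32
    rw [Vorbis.addr_add_lit]
  have hm := hmalloc A.2 g.frames' A.1
  u_walk hcode [hμ.vendor] until [Vorbis.L.start_decoder.cut139] span [Vorbis.L.textLo, Vorbis.L.textHi] side (v_side)
  case call_inv => v_inv
  case pre_114a42 =>
    have hun : ShadowUntouched v.mem s_114a42.mem := by v_untouched
    apply c8b_malloc_pre hfr0 hcur hun
    · rw [w_mem]
      apply Mem.EqOn.writeLE
      · u_omega
      · u_omega
    · rw [w_rsp]
      u_omega
    · rw [w_rdi]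
      exact toNat_addr _ (by omega)
  -- 0x114a47: setup_malloc(f, 4·SE + 4) returned
  have ersi : (s_114a42.reg .rsi).toNat % 2 ^ 32 = 4 * ((Codebook.sorted_entries v.mem c).toNat + 1) := by
    rw [w_rsi_114a42]
    exact c8b_req _ hse24
  simp only [X86.User.Spec.footprint, vspec] at w_same
  have e_sp : (s_114a42.reg .rsp).toNat + 8 = g.R := by
    rw [w_rsp_114a42]
    u_omega
  have e_a : (v.reg .rsp - 8).toNat + 8 = g.R := by u_omega
  have e_rdi : (s_114a42.reg .rdi).toNat = g.f := by
    rw [w_rdi_114a42]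
    exact toNat_addr _ (by omega)
  rw [← hc] at ersi
  by_cases hfit : A.1.Fits ((s_114a42.reg .rsi).toNat % 2 ^ 32)
  · -- the request fits: the ghost arena grows by the block of `sorted_values`
    obtain ⟨ws, hall, hok⟩ := alloc_call_same hpos w_mem_114a42 e_a e_sp e_rdi w_same (shadow_win_of_fits hcur.sd.arena hfit)
    obtain ⟨r1, r2, r3, r4, r5⟩ := Cur.alloc_call hfr0 hcur w_mem_114a42 e_a e_sp e_rdi w_same w_post hfit w_rip w_rsp
      (Vorbis.conv_code_eqOn w_code) w_inv (w_kept.get .r14 rfl)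
    apply ReachVia.done
    refine c8b_build h hsc hsv0 r1 r2 r3 hall hok (A.1.extends_pushSetup _) rfl rfl (w_kept.get .rbx rfl)
      (w_kept.get .r12 rfl) (Or.inr ?_)
    have hsince := hcur.sd.arena.since_pushSetup ((s_114a42.reg .rsi).toNat % 2 ^ 32)
    rw [r5, ← ersi, Nat.add_assoc]
    exact hsince
  · -- the request does not fit: rax = 0, the same ghost
    obtain ⟨_, _, _, hfail⟩ := w_post.2 hfit
    obtain ⟨ws, hall, hok⟩ := c8b_fail_same hpos w_mem_114a42 e_a e_sp e_rdi hfail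
    obtain ⟨r1, r2, r3, r4, r5⟩ := Cur.alloc_fail_any hfr0 hcur w_mem_114a42 e_a e_sp e_rdi w_same w_post hfit
      w_rip w_rsp (Vorbis.conv_code_eqOn w_code) w_inv (w_kept.get .r14 rfl)
    apply ReachVia.done
    exact c8b_build h hsc hsv0 r1 r2 r3 hall hok (Arena.Extends.refl _) rfl rfl (w_kept.get .rbx rfl)
      (w_kept.get .r12 rfl) (Or.inl r5)

end Vorbis.Spec.start_decoder_C8b
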